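-- pv_equiv track=rewrite | github.com/zzuisa/eztrip | backend/app/tools/db/station_resolver.py | _umlaut_variants
-- ===== SOURCE A (Python) =====
-- from typing import Dict, List, Optional
--
-- def _umlaut_variants(s: str) -> List[str]:
--     out = [s]
--     repl = [("ae", "ä"), ("oe", "ö"), ("ue", "ü"), ("Ae", "Ä"), ("Oe", "Ö"), ("Ue", "Ü")]
--     v = s
--     for a, b in repl:
--         v = v.replace(a, b)
--     if v != s:
--         out.append(v)
--     return out
-- ===== SOURCE B (Python) =====
-- from typing import List
--
-- _FIRSTS = {"a": "ä", "o": "ö", "u": "ü", "A": "Ä", "O": "Ö", "U": "Ü"}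
--
-- def _umlaut_variants(s: str) -> List[str]:
--     chars = []
--     i = 0
--     n = len(s)
--     while i < n:
--         u = _FIRSTS.get(s[i]) if i + 1 < n and s[i + 1] == "e" else None
--         if u is not None:
--             chars.append(u)
--             i += 2
--         else:
--             chars.append(s[i])
--             i += 1
--     v = "".join(chars)
--     out = [s]
--     if v != s:
--         out.append(v)
--     return out
-- ===== Notes on version B (the rewrite author's own statement) =====
-- stated objective: alternative
-- what changed: Replaces six sequential full-string str.replace passes by a single left-to-right windowed scan that looks up the (letter,'e') two-character window in a dict and advances by two on a match.
import Mathlib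
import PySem

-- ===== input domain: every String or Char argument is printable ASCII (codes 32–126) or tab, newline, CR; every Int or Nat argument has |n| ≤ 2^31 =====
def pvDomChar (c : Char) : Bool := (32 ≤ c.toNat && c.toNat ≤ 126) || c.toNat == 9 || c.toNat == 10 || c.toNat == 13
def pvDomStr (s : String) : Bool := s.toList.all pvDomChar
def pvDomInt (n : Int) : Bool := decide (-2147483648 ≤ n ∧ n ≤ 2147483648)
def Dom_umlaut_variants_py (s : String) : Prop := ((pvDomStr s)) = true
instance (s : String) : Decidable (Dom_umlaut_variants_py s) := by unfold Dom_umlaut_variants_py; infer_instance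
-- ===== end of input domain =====

-- B replaces A's six sequential str.replace passes by one windowed scan with a dict lookup (alternative decomposition, same result).

-- ===== PORT A =====
def umlaut_variants_py (s : String) : List String :=
  let out := [s]
  let repl : List (String × String) :=
    [("ae", "ä"), ("oe", "ö"), ("ue", "ü"), ("Ae", "Ä"), ("Oe", "Ö"), ("Ue", "Ü")]
  let v := repl.foldl (fun v p => PySem.Str.replace v p.1 p.2) s
  if v ≠ s then out ++ [v] else out

-- ===== PORT B =====
def umlautFirsts : PySem.Dict Char Char :=
  PySem.Dict.ofList [('a', 'ä'), ('o', 'ö'), ('u', 'ü'), ('A', 'Ä'), ('O', 'Ö'), ('U', 'Ü')]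

-- the while-loop of Source B over indices i, as structural recursion on the remaining characters;
-- the list of one-char strings joined by "".join is accumulated directly as a list of chars
def umlautScan : List Char → List Char
  | [] => []
  | [c] => [c]
  | c1 :: c2 :: t =>
    match (if c2 = 'e' then umlautFirsts.get? c1 else none) with
    | some u => u :: umlautScan t
    | none => c1 :: umlautScan (c2 :: t)

def umlaut_variants_py_alt (s : String) : List String :=
  let v := String.ofList (umlautScan s.toList)
  let out := [s]
  if v ≠ s then out ++ [v] else out

-- ===== PRECONDITION & SPEC =====
def Spec_umlaut_variants_py (s : String) (out : List String) : Prop := out = umlaut_variants_py_alt s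
instance (s : String) (out : List String) : Decidable (Spec_umlaut_variants_py s out) := by unfold Spec_umlaut_variants_py; infer_instance

-- ===== CLAIM (what is proved, stated in full; the proofs are below) =====
def Claim_equal_umlaut_variants_py : Prop := ∀ (s : String), Dom_umlaut_variants_py s → Spec_umlaut_variants_py s (umlaut_variants_py s)

-- ===== LEMMAS AND PROOFS =====

-- fuel-free model of one str.replace pass for a two-character pattern [a, 'e'] → [u]
def rp (a u : Char) : List Char → List Char
  | [] => []
  | [c] => [c]
  | c1 :: c2 :: t => if c1 = a ∧ c2 = 'e' then u :: rp a u t else c1 :: rp a u (c2 :: t)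

theorem rp_skip (a u c : Char) (h : c ≠ a) (l : List Char) :
    rp a u (c :: l) = c :: rp a u l := by
  cases l with
  | nil => rfl
  | cons d t => simp [rp, h]

theorem rp_skip2 (a u c : Char) (l : List Char) (h : l.head? ≠ some 'e') :
    rp a u (c :: l) = c :: rp a u l := by
  cases l with
  | nil => rfl
  | cons d t =>
    have hd : d ≠ 'e' := fun h' => h (by simp [h'])
    simp [rp, hd]

theorem rp_match (a u : Char) (t : List Char) :
    rp a u (a :: 'e' :: t) = u :: rp a u t := by
  simp [rp]

theorem rp_head_ne (a u : Char) (l : List Char) (hu : u ≠ 'e') (h : l.head? ≠ some 'e') :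
    (rp a u l).head? ≠ some 'e' := by
  cases l with
  | nil => simp [rp]
  | cons c t =>
    cases t with
    | nil => simpa [rp] using h
    | cons d t' =>
      simp only [List.head?] at h
      by_cases hc : c = a ∧ d = 'e'
      · simp [rp, hc, hu]
      · simpa [rp, hc] using h

theorem go_eq (a u : Char) : ∀ (fuel : Nat) (l acc : List Char), l.length ≤ fuel →
    PySem.Chars.replace.go [a, 'e'] [u] fuel l acc = acc.reverse ++ rp a u l := by
  intro fuel
  induction fuel with
  | zero =>
    intro l acc h
    have hl : l = [] := List.length_eq_zero_iff.mp (Nat.le_zero.mp h)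
    subst hl
    show List.reverse acc ++ [] = _
    simp [rp]
  | succ n ih =>
    intro l acc h
    cases l with
    | nil =>
      show List.reverse acc = _
      simp [rp]
    | cons c t =>
      have hstep : PySem.Chars.replace.go [a, 'e'] [u] (n + 1) (c :: t) acc =
          if List.isPrefixOf [a, 'e'] (c :: t) = true then
            PySem.Chars.replace.go [a, 'e'] [u] n (List.drop (List.length [a, 'e']) (c :: t))
              (List.reverse [u] ++ acc)
          else PySem.Chars.replace.go [a, 'e'] [u] n t (c :: acc) := rfl
      rw [hstep]
      by_cases hp : List.isPrefixOf [a, 'e'] (c :: t) = true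
      · -- pattern matches at the front: c = a and t = 'e' :: t'
        cases t with
        | nil => simp [List.isPrefixOf] at hp
        | cons d t' =>
          simp only [List.isPrefixOf, Bool.and_eq_true, beq_iff_eq, and_true] at hp
          obtain ⟨hca, hde⟩ := hp
          have hlen : t'.length ≤ n := by
            simp only [List.length_cons] at h; omega
          rw [if_pos (by simp [List.isPrefixOf, ← hca, ← hde])]
          rw [show List.drop (List.length [a, 'e']) (c :: d :: t') = t' by simp]
          rw [ih t' (List.reverse [u] ++ acc) hlen]
          rw [show rp a u (c :: d :: t') = u :: rp a u t' from by
            rw [← hca, ← hde]; exact rp_match a u t']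
          simp
      · rw [if_neg hp]
        have hlen : t.length ≤ n := by
          simp only [List.length_cons] at h; omega
        rw [ih t (c :: acc) hlen]
        have hrp : rp a u (c :: t) = c :: rp a u t := by
          cases t with
          | nil => rfl
          | cons d t' =>
            simp only [List.isPrefixOf, Bool.and_eq_true, beq_iff_eq, and_true] at hp
            have hp' : ¬(c = a ∧ d = 'e') := fun hx => hp ⟨hx.1.symm, hx.2.symm⟩
            simp [rp, hp']
        simp [hrp]

theorem replace_eq (a u : Char) (l : List Char) :
    PySem.Chars.replace l [a, 'e'] [u] = rp a u l := by
  unfold PySem.Chars.replace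
  rw [if_neg (by simp)]
  simpa using go_eq a u l.length l [] le_rfl

theorem umlautFirsts_eq :
    umlautFirsts = PySem.Dict.mk [('a', 'ä'), ('o', 'ö'), ('u', 'ü'), ('A', 'Ä'), ('O', 'Ö'), ('U', 'Ü')] := by
  decide

-- the six sequential passes equal the single windowed scan of B
theorem chain_eq : ∀ l : List Char,
    rp 'U' 'Ü' (rp 'O' 'Ö' (rp 'A' 'Ä' (rp 'u' 'ü' (rp 'o' 'ö' (rp 'a' 'ä' l))))) = umlautScan l := by
  intro l
  induction l using umlautScan.induct with
  | case1 => simp [rp, umlautScan]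
  | case2 c => simp [rp, umlautScan]
  | case3 c1 c2 t u hu ih =>
    -- window matched: c2 = 'e' and c1 is one of the six first letters
    have hc2 : c2 = 'e' := by by_cases h : c2 = 'e' <;> simp [h] at hu ⊢
    subst hc2
    rw [if_pos rfl] at hu
    have hscan : umlautScan (c1 :: 'e' :: t) = u :: umlautScan t := by
      rw [umlautScan]; rw [if_pos rfl, hu]
    rw [hscan, ← ih]
    rw [umlautFirsts_eq] at hu
    simp only [PySem.Dict.get?_mk_cons] at hu
    by_cases h1 : 'a' = c1
    · subst h1
      have huv : 'ä' = u := by simpa using hu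
      subst huv
      simp only [rp_match 'a' 'ä', rp_skip 'o' 'ö' 'ä' (by decide),
        rp_skip 'u' 'ü' 'ä' (by decide), rp_skip 'A' 'Ä' 'ä' (by decide),
        rp_skip 'O' 'Ö' 'ä' (by decide), rp_skip 'U' 'Ü' 'ä' (by decide)]
    · by_cases h2 : 'o' = c1
      · subst h2
        have huv : 'ö' = u := by simpa [h1] using hu
        subst huv
        simp only [rp_skip 'a' 'ä' 'o' (by decide), rp_skip 'a' 'ä' 'e' (by decide),
          rp_match 'o' 'ö', rp_skip 'u' 'ü' 'ö' (by decide), rp_skip 'A' 'Ä' 'ö' (by decide),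
          rp_skip 'O' 'Ö' 'ö' (by decide), rp_skip 'U' 'Ü' 'ö' (by decide)]
      · by_cases h3 : 'u' = c1
        · subst h3
          have huv : 'ü' = u := by simpa [h1, h2] using hu
          subst huv
          simp only [rp_skip 'a' 'ä' 'u' (by decide), rp_skip 'a' 'ä' 'e' (by decide),
            rp_skip 'o' 'ö' 'u' (by decide), rp_skip 'o' 'ö' 'e' (by decide),
            rp_match 'u' 'ü', rp_skip 'A' 'Ä' 'ü' (by decide),
            rp_skip 'O' 'Ö' 'ü' (by decide), rp_skip 'U' 'Ü' 'ü' (by decide)]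
        · by_cases h4 : 'A' = c1
          · subst h4
            have huv : 'Ä' = u := by simpa [h1, h2, h3] using hu
            subst huv
            simp only [rp_skip 'a' 'ä' 'A' (by decide), rp_skip 'a' 'ä' 'e' (by decide),
              rp_skip 'o' 'ö' 'A' (by decide), rp_skip 'o' 'ö' 'e' (by decide),
              rp_skip 'u' 'ü' 'A' (by decide), rp_skip 'u' 'ü' 'e' (by decide),
              rp_match 'A' 'Ä', rp_skip 'O' 'Ö' 'Ä' (by decide),
              rp_skip 'U' 'Ü' 'Ä' (by decide)]
          · by_cases h5 : 'O' = c1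
            · subst h5
              have huv : 'Ö' = u := by simpa [h1, h2, h3, h4] using hu
              subst huv
              simp only [rp_skip 'a' 'ä' 'O' (by decide), rp_skip 'a' 'ä' 'e' (by decide),
                rp_skip 'o' 'ö' 'O' (by decide), rp_skip 'o' 'ö' 'e' (by decide),
                rp_skip 'u' 'ü' 'O' (by decide), rp_skip 'u' 'ü' 'e' (by decide),
                rp_skip 'A' 'Ä' 'O' (by decide), rp_skip 'A' 'Ä' 'e' (by decide),
                rp_match 'O' 'Ö', rp_skip 'U' 'Ü' 'Ö' (by decide)]
            · by_cases h6 : 'U' = c1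
              · subst h6
                have huv : 'Ü' = u := by simpa [h1, h2, h3, h4, h5] using hu
                subst huv
                simp only [rp_skip 'a' 'ä' 'U' (by decide), rp_skip 'a' 'ä' 'e' (by decide),
                  rp_skip 'o' 'ö' 'U' (by decide), rp_skip 'o' 'ö' 'e' (by decide),
                  rp_skip 'u' 'ü' 'U' (by decide), rp_skip 'u' 'ü' 'e' (by decide),
                  rp_skip 'A' 'Ä' 'U' (by decide), rp_skip 'A' 'Ä' 'e' (by decide),
                  rp_skip 'O' 'Ö' 'U' (by decide), rp_skip 'O' 'Ö' 'e' (by decide),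
                  rp_match 'U' 'Ü']
              · simp [h1, h2, h3, h4, h5, h6, PySem.Dict.get?] at hu
  | case4 c1 c2 t hn ih =>
    -- no window match: the head character passes every pass unchanged
    have hscan : umlautScan (c1 :: c2 :: t) = c1 :: umlautScan (c2 :: t) := by
      rw [umlautScan]; rw [hn]
    rw [hscan, ← ih]
    by_cases hc2 : c2 = 'e'
    · -- c2 = 'e' but c1 is none of the six keys
      subst hc2
      rw [if_pos rfl, umlautFirsts_eq] at hn
      simp only [PySem.Dict.get?_mk_cons, beq_iff_eq] at hn
      by_cases h1 : 'a' = c1; · rw [if_pos h1] at hn; cases hn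
      by_cases h2 : 'o' = c1; · rw [if_neg h1, if_pos h2] at hn; cases hn
      by_cases h3 : 'u' = c1; · rw [if_neg h1, if_neg h2, if_pos h3] at hn; cases hn
      by_cases h4 : 'A' = c1; · rw [if_neg h1, if_neg h2, if_neg h3, if_pos h4] at hn; cases hn
      by_cases h5 : 'O' = c1; · rw [if_neg h1, if_neg h2, if_neg h3, if_neg h4, if_pos h5] at hn; cases hn
      by_cases h6 : 'U' = c1; · rw [if_neg h1, if_neg h2, if_neg h3, if_neg h4, if_neg h5, if_pos h6] at hn; cases hn
      simp only [rp_skip 'a' 'ä' c1 (fun hx => h1 hx.symm), rp_skip 'o' 'ö' c1 (fun hx => h2 hx.symm),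
        rp_skip 'u' 'ü' c1 (fun hx => h3 hx.symm), rp_skip 'A' 'Ä' c1 (fun hx => h4 hx.symm),
        rp_skip 'O' 'Ö' c1 (fun hx => h5 hx.symm), rp_skip 'U' 'Ü' c1 (fun hx => h6 hx.symm)]
    · -- c2 ≠ 'e': no pass can consume c1 together with the next character
      have e0 : (c2 :: t).head? ≠ some 'e' := by simp [hc2]
      have e1 := rp_head_ne 'a' 'ä' (c2 :: t) (by decide) e0
      have e2 := rp_head_ne 'o' 'ö' _ (by decide) e1
      have e3 := rp_head_ne 'u' 'ü' _ (by decide) e2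
      have e4 := rp_head_ne 'A' 'Ä' _ (by decide) e3
      have e5 := rp_head_ne 'O' 'Ö' _ (by decide) e4
      rw [rp_skip2 'a' 'ä' c1 _ e0, rp_skip2 'o' 'ö' c1 _ e1, rp_skip2 'u' 'ü' c1 _ e2,
        rp_skip2 'A' 'Ä' c1 _ e3, rp_skip2 'O' 'Ö' c1 _ e4, rp_skip2 'U' 'Ü' c1 _ e5]

theorem foldl_eq_scan (s : String) :
    ([("ae", "ä"), ("oe", "ö"), ("ue", "ü"), ("Ae", "Ä"), ("Oe", "Ö"), ("Ue", "Ü")].foldl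
        (fun v p => PySem.Str.replace v p.1 p.2) s) = String.ofList (umlautScan s.toList) := by
  rw [← String.toList_inj]
  simp only [List.foldl, String.toList_ofList]
  rw [PySem.Str.toList_replace, PySem.Str.toList_replace, PySem.Str.toList_replace,
    PySem.Str.toList_replace, PySem.Str.toList_replace, PySem.Str.toList_replace]
  show PySem.Chars.replace (PySem.Chars.replace (PySem.Chars.replace (PySem.Chars.replace
      (PySem.Chars.replace (PySem.Chars.replace s.toList ['a','e'] ['ä']) ['o','e'] ['ö'])
      ['u','e'] ['ü']) ['A','e'] ['Ä']) ['O','e'] ['Ö']) ['U','e'] ['Ü'] = umlautScan s.toList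
  rw [replace_eq, replace_eq, replace_eq, replace_eq, replace_eq, replace_eq]
  exact chain_eq s.toList

-- ===== VERDICT (by name: the statement is the Claim_ definition above) =====
theorem umlaut_variants_py_spec : Claim_equal_umlaut_variants_py := by
  intro s _
  show umlaut_variants_py s = umlaut_variants_py_alt s
  simp only [umlaut_variants_py, umlaut_variants_py_alt, foldl_eq_scan]
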